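-- pv_equiv track=rewrite | github.com/noguesan/TP_Integrado_lenguajes | src/utils/funciones.py | agrupar_por_anio_y_trimestre
-- ===== SOURCE A (Python) =====
-- def separar_por_trimestre(dict_anios):
--     dict_final = {}
--     for anio in dict_anios:
--         dict_temporal = {}
--
--         for filas in dict_anios[anio]:
--             trimestre = filas[2]
--             if trimestre not in dict_temporal:
--                 dict_temporal[trimestre] = []
--             dict_temporal[trimestre].append(filas)
--
--         dict_final[anio] = dict_temporal
--     return dict_final
--
-- def agrupar_por_anio_y_trimestre(filas, col_anio=1):
--     grupos = {}
--     for fila in filas: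
--         anio = fila[col_anio]
--         if anio not in grupos:
--             grupos[anio] = []
--         grupos[anio].append(fila)
--     grupos_final = separar_por_trimestre(grupos)
--     return grupos_final
-- ===== SOURCE B (Python) =====
-- def agrupar_por_anio_y_trimestre(filas, col_anio=1):
--     grupos = {}
--     for fila in filas:
--         grupos.setdefault(fila[col_anio], {}).setdefault(fila[2], []).append(fila)
--     return grupos
-- ===== Notes on version B (the rewrite author's own statement) =====
-- stated objective: simpler
-- what changed: Collapses A's two passes (group rows by year, then re-iterate each year's rows to split by quarter via a helper) into one loop building the nested dict directly with setdefault.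
import Mathlib
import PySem

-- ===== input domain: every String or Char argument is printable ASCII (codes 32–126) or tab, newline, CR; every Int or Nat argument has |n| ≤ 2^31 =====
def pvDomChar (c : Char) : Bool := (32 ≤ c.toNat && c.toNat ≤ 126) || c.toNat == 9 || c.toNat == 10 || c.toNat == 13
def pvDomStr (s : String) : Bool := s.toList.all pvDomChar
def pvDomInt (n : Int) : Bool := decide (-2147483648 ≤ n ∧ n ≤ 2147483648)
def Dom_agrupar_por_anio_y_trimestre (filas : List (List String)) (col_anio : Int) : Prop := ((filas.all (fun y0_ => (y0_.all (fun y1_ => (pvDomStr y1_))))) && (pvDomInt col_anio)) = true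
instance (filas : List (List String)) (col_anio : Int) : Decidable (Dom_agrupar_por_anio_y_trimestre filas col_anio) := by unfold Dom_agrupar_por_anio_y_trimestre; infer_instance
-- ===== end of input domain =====

-- B collapses A's two passes (group by year, then a helper re-splitting each year's rows by quarter)
-- into ONE loop building the nested dict directly with setdefault; objective: simpler.

-- fila[i]  (IndexError = none, excluded by Pre_; the "" default is never reached inside Pre_)
def pvCol (fila : List String) (i : Int) : String := (PySem.List.pyGet? fila i).getD ""

-- ===== PORT A =====
-- 'for anio in dict_anios:' iterates keys in insertion order, 'dict_anios[anio]' fetches the value: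
-- exact as a fold over the items list (keys are unique, values paired in the same order).
def separar_por_trimestre (dict_anios : PySem.Dict String (List (List String))) :
    PySem.Dict String (PySem.Dict String (List (List String))) :=
  dict_anios.items.foldl (fun dict_final p =>
    let dict_temporal := p.2.foldl (fun dt filas_ =>
      let trimestre := pvCol filas_ 2
      let dt1 := if dt.contains trimestre then dt else dt.insert trimestre []
      dt1.insert trimestre (dt1.getD trimestre [] ++ [filas_])) PySem.Dict.empty
    dict_final.insert p.1 dict_temporal) PySem.Dict.empty

def agrupar_por_anio_y_trimestre (filas : List (List String)) (col_anio : Int) :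
    List (String × List (String × List (List String))) :=
  let grupos := filas.foldl (fun g fila =>
    let anio := pvCol fila col_anio
    let g1 := if g.contains anio then g else g.insert anio []
    g1.insert anio (g1.getD anio [] ++ [fila])) PySem.Dict.empty
  (separar_por_trimestre grupos).items.map (fun p => (p.1, p.2.items))

-- ===== PORT B =====
def agrupar_por_anio_y_trimestre_alt (filas : List (List String)) (col_anio : Int) :
    List (String × List (String × List (List String))) :=
  let grupos := filas.foldl (fun g fila =>
    let g1 := g.setdefault (pvCol fila col_anio) PySem.Dict.empty
    let inner := g1.getD (pvCol fila col_anio) PySem.Dict.empty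
    let inner1 := inner.setdefault (pvCol fila 2) []
    g1.insert (pvCol fila col_anio)
      (inner1.insert (pvCol fila 2) (inner1.getD (pvCol fila 2) [] ++ [fila]))) PySem.Dict.empty
  grupos.items.map (fun p => (p.1, p.2.items))

-- ===== PRECONDITION & SPEC =====
-- Pre_: every row admits both lookups fila[col_anio] and fila[2]; otherwise Python raises IndexError.
def Pre_agrupar_por_anio_y_trimestre (filas : List (List String)) (col_anio : Int) : Prop :=
  ∀ fila ∈ filas, PySem.Raise.InRange fila.length col_anio ∧ PySem.Raise.InRange fila.length 2
instance (filas : List (List String)) (col_anio : Int) : Decidable (Pre_agrupar_por_anio_y_trimestre filas col_anio) := by unfold Pre_agrupar_por_anio_y_trimestre; infer_instance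
def pvWitness_agrupar_por_anio_y_trimestre : List (List String) × Int :=
  ([["a", "2020", "Q1"], ["b", "2020", "Q2"], ["c", "2021", "Q1"]], 1)

def Spec_agrupar_por_anio_y_trimestre (filas : List (List String)) (col_anio : Int) (out : List (String × List (String × List (List String)))) : Prop := out = agrupar_por_anio_y_trimestre_alt filas col_anio
instance (filas : List (List String)) (col_anio : Int) (out : List (String × List (String × List (List String)))) : Decidable (Spec_agrupar_por_anio_y_trimestre filas col_anio out) := by unfold Spec_agrupar_por_anio_y_trimestre; infer_instance

-- ===== CLAIM (what is proved, stated in full; the proofs are below) =====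
def Claim_equal_agrupar_por_anio_y_trimestre : Prop := ∀ (filas : List (List String)) (col_anio : Int), Dom_agrupar_por_anio_y_trimestre filas col_anio → Pre_agrupar_por_anio_y_trimestre filas col_anio → Spec_agrupar_por_anio_y_trimestre filas col_anio (agrupar_por_anio_y_trimestre filas col_anio)

-- ===== LEMMAS AND PROOFS =====

-- normalized step functions (proof-only)
def pvStepA (col : Int) (g : PySem.Dict String (List (List String))) (fila : List String) :
    PySem.Dict String (List (List String)) :=
  g.insert (pvCol fila col) (g.getD (pvCol fila col) [] ++ [fila])

def pvStepT (dt : PySem.Dict String (List (List String))) (fila : List String) :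
    PySem.Dict String (List (List String)) :=
  dt.insert (pvCol fila 2) (dt.getD (pvCol fila 2) [] ++ [fila])

def pvSplitq (rows : List (List String)) : PySem.Dict String (List (List String)) :=
  rows.foldl pvStepT PySem.Dict.empty

def pvSep (d : PySem.Dict String (List (List String))) :
    PySem.Dict String (PySem.Dict String (List (List String))) :=
  d.items.foldl (fun df p => df.insert p.1 (pvSplitq p.2)) PySem.Dict.empty

def pvStepB (col : Int) (h : PySem.Dict String (PySem.Dict String (List (List String))))
    (fila : List String) : PySem.Dict String (PySem.Dict String (List (List String))) :=
  h.insert (pvCol fila col) (pvStepT (h.getD (pvCol fila col) PySem.Dict.empty) fila)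

-- "if k not in d: d[k]=[]; d[k].append(x)" collapses to one insert
theorem pv_ifstep_eq {ν : Type} (dt : PySem.Dict String (List ν)) (t : String) (x : ν) :
    (let dt1 := if dt.contains t then dt else dt.insert t []
     dt1.insert t (dt1.getD t [] ++ [x])) = dt.insert t (dt.getD t [] ++ [x]) := by
  by_cases hc : dt.contains t = true
  · simp [hc]
  · simp only [Bool.not_eq_true] at hc
    simp [hc, PySem.Dict.getD_insert_self, PySem.Dict.insert_insert_self,
      PySem.Dict.getD_of_not_contains dt _ hc]

theorem pv_setdefstep_eq {ν : Type} (dt : PySem.Dict String (List ν)) (t : String) (x : ν) :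
    (let dt1 := dt.setdefault t []
     dt1.insert t (dt1.getD t [] ++ [x])) = dt.insert t (dt.getD t [] ++ [x]) := by
  by_cases hc : dt.contains t = true
  · simp [PySem.Dict.setdefault_of_contains dt _ hc]
  · simp only [Bool.not_eq_true] at hc
    simp [PySem.Dict.setdefault_of_not_contains dt _ hc, PySem.Dict.getD_insert_self,
      PySem.Dict.insert_insert_self, PySem.Dict.getD_of_not_contains dt _ hc]

theorem pv_sepA_eq (d : PySem.Dict String (List (List String))) :
    separar_por_trimestre d = pvSep d := by
  unfold separar_por_trimestre pvSep
  congr 1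
  funext df p
  have h : (p.2.foldl (fun dt filas_ =>
      let trimestre := pvCol filas_ 2
      let dt1 := if dt.contains trimestre then dt else dt.insert trimestre []
      dt1.insert trimestre (dt1.getD trimestre [] ++ [filas_])) PySem.Dict.empty) = pvSplitq p.2 := by
    unfold pvSplitq
    congr 1
    funext dt fila
    exact pv_ifstep_eq dt (pvCol fila 2) fila
  exact congrArg (df.insert p.1) h

theorem pv_stepB_eq (col : Int) :
    (fun (g : PySem.Dict String (PySem.Dict String (List (List String)))) fila =>
      let g1 := g.setdefault (pvCol fila col) PySem.Dict.empty
      let inner := g1.getD (pvCol fila col) PySem.Dict.empty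
      let inner1 := inner.setdefault (pvCol fila 2) []
      g1.insert (pvCol fila col)
        (inner1.insert (pvCol fila 2) (inner1.getD (pvCol fila 2) [] ++ [fila]))) = pvStepB col := by
  funext g fila
  show (let g1 := g.setdefault (pvCol fila col) PySem.Dict.empty
        let inner := g1.getD (pvCol fila col) PySem.Dict.empty
        let inner1 := inner.setdefault (pvCol fila 2) []
        g1.insert (pvCol fila col)
          (inner1.insert (pvCol fila 2) (inner1.getD (pvCol fila 2) [] ++ [fila]))) = _
  by_cases hc : g.contains (pvCol fila col) = true
  · simp only [PySem.Dict.setdefault_of_contains g _ hc]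
    rw [pv_setdefstep_eq]
    rfl
  · simp only [Bool.not_eq_true] at hc
    simp only [PySem.Dict.setdefault_of_not_contains g _ hc, PySem.Dict.getD_insert_self,
      PySem.Dict.insert_insert_self]
    rw [pv_setdefstep_eq]
    unfold pvStepB pvStepT
    rw [PySem.Dict.getD_of_not_contains g _ hc]

-- keys of the mapped items
theorem pv_sep_items (d : PySem.Dict String (List (List String))) (hnd : d.keys.Nodup) :
    (pvSep d).items = d.items.map (fun p => (p.1, pvSplitq p.2)) := by
  unfold pvSep
  have := PySem.Dict.items_foldl_insert_fresh d.items Prod.fst (fun p => pvSplitq p.2)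
      PySem.Dict.empty (fun a _ => by simp [PySem.Dict.contains_empty]) hnd
  simpa [PySem.Dict.empty] using this

theorem pv_contains_sep (d : PySem.Dict String (List (List String))) (hnd : d.keys.Nodup)
    (a : String) : (pvSep d).contains a = d.contains a := by
  simp [PySem.Dict.contains, pv_sep_items d hnd, List.any_map, Function.comp_def]

theorem pv_keys_sep (d : PySem.Dict String (List (List String))) (hnd : d.keys.Nodup) :
    (pvSep d).keys = d.keys := by
  simp [PySem.Dict.keys, pv_sep_items d hnd, List.map_map, Function.comp_def]

-- the one-step commuting square
theorem pv_step_comm (col : Int) (g : PySem.Dict String (List (List String)))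
    (fila : List String) (hnd : g.keys.Nodup) :
    pvSep (pvStepA col g fila) = pvStepB col (pvSep g) fila := by
  set a := pvCol fila col with ha
  by_cases hc : g.contains a = true
  · -- year already present: replace in place on both sides
    obtain ⟨p, hpmem, hpa⟩ := List.any_eq_true.mp hc
    have hpa' : p.1 = a := by simpa using hpa
    have hget : g.getD a [] = p.2 := by
      have : (a, p.2) ∈ g.items := by rw [← hpa']; exact hpmem
      exact PySem.Dict.getD_of_mem_items g this hnd []
    have hsget : (pvSep g).getD a PySem.Dict.empty = pvSplitq p.2 := by
      have hmem : (a, pvSplitq p.2) ∈ (pvSep g).items := by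
        rw [pv_sep_items g hnd]
        exact List.mem_map.mpr ⟨p, hpmem, by rw [hpa']⟩
      have hknd : (pvSep g).keys.Nodup := by rw [pv_keys_sep g hnd]; exact hnd
      exact PySem.Dict.getD_of_mem_items _ hmem hknd _
    apply PySem.Dict.ext
    have hcs : (pvSep g).contains a = true := by rw [pv_contains_sep g hnd]; exact hc
    have hndA : (pvStepA col g fila).keys.Nodup := PySem.Dict.nodup_keys_insert _ _ _ hnd
    rw [pv_sep_items _ hndA]
    unfold pvStepA pvStepB
    rw [← ha, PySem.Dict.items_insert, PySem.Dict.items_insert]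
    simp only [hc, hcs, if_pos, pv_sep_items g hnd, List.map_map]
    apply List.map_congr_left
    intro q hq
    by_cases hqa : (q.1 == a) = true
    · simp only [Function.comp, hqa, if_pos]
      have hq2 : g.getD a [] = q.2 := by
        have hq1 : q.1 = a := by simpa using hqa
        have : (a, q.2) ∈ g.items := by rw [← hq1]; exact hq
        exact PySem.Dict.getD_of_mem_items g this hnd []
      have hsplit : pvSplitq (g.getD a [] ++ [fila]) = pvStepT (pvSplitq (g.getD a [])) fila := by
        unfold pvSplitq; rw [List.foldl_append]; rfl
      rw [hsget, hsplit, hget]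
    · simp [Function.comp, hqa]
  · -- fresh year: both sides append
    simp only [Bool.not_eq_true] at hc
    have hgd : g.getD a [] = [] := PySem.Dict.getD_of_not_contains g _ hc
    have hcs : (pvSep g).contains a = false := by rw [pv_contains_sep g hnd]; exact hc
    have hsgd : (pvSep g).getD a PySem.Dict.empty = PySem.Dict.empty :=
      PySem.Dict.getD_of_not_contains _ _ hcs
    apply PySem.Dict.ext
    have hndA : (pvStepA col g fila).keys.Nodup := PySem.Dict.nodup_keys_insert _ _ _ hnd
    rw [pv_sep_items _ hndA]
    unfold pvStepA pvStepB
    rw [← ha, PySem.Dict.items_insert, PySem.Dict.items_insert]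
    simp only [hc, hcs, if_neg, Bool.false_eq_true, not_false_iff, hgd, hsgd,
      pv_sep_items g hnd, List.map_append]
    rfl

theorem pv_fold_comm (col : Int) (filas : List (List String))
    (g : PySem.Dict String (List (List String))) (hnd : g.keys.Nodup) :
    pvSep (filas.foldl (pvStepA col) g) = filas.foldl (pvStepB col) (pvSep g) := by
  induction filas generalizing g with
  | nil => rfl
  | cons fila rest ih =>
    simp only [List.foldl_cons]
    rw [← pv_step_comm col g fila hnd]
    exact ih _ (PySem.Dict.nodup_keys_insert _ _ _ hnd)

-- ===== VERDICT (by name: the statement is the Claim_ definition above) =====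
theorem agrupar_por_anio_y_trimestre_spec : Claim_equal_agrupar_por_anio_y_trimestre := by
  intro filas col_anio _ _
  unfold Spec_agrupar_por_anio_y_trimestre
  simp only [agrupar_por_anio_y_trimestre, agrupar_por_anio_y_trimestre_alt]
  have hA : (fun (g : PySem.Dict String (List (List String))) fila =>
      let anio := pvCol fila col_anio
      let g1 := if g.contains anio then g else g.insert anio []
      g1.insert anio (g1.getD anio [] ++ [fila])) = pvStepA col_anio := by
    funext g fila
    exact pv_ifstep_eq g (pvCol fila col_anio) fila
  rw [hA, pv_stepB_eq col_anio, pv_sepA_eq,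
    pv_fold_comm col_anio filas PySem.Dict.empty (by simp [PySem.Dict.empty, PySem.Dict.keys])]
  rfl
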